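-- pv_equiv track=rewrite | github.com/ntalukde/node2binary | util/get_hyponyms.py | get_hyponyms
-- ===== SOURCE A (Python) =====
-- def get_hyponyms(pairs):
--     edges = dict()
--     words = set()
--     for (A,B) in pairs:
--         words.add(A)
--         words.add(B)
--         if A not in edges:
--             edges[A] = []
--         if B not in edges:
--             edges[B] = []
--         edges[B].append(A) # reverse of what is done elsewhere
--
--     return (words, edges)
-- ===== SOURCE B (Python) =====
-- def get_hyponyms(pairs):
--     # Per-key construction: each adjacency list is computed independently by
--     # filtering the pair list, instead of growing a dict incrementally.
--     pairs = list(pairs)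
--     words = {w for a, b in pairs for w in (a, b)}
--     edges = {w: [a for a, b in pairs if b == w] for w in words}
--     return (words, edges)
-- ===== Notes on version B (the rewrite author's own statement) =====
-- stated objective: simpler
-- what changed: A grows the dict incrementally in one fused loop with membership tests and per-pair appends; B materializes the pairs, takes the word set, and computes each word's adjacency list independently as a filter of the pair list in a dict comprehension (per-key scans instead of an incremental dict).
import Mathlib
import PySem

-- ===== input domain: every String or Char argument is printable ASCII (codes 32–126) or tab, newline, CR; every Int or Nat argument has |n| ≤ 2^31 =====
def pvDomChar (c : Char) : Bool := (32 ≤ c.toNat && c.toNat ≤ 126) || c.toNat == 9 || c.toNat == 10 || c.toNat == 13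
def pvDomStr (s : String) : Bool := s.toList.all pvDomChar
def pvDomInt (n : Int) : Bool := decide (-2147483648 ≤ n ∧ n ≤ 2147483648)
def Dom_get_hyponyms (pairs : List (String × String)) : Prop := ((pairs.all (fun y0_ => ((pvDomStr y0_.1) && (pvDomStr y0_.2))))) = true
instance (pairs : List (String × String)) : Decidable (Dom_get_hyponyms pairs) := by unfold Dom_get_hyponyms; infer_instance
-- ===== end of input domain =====

-- B replaces A's fused incremental-dict loop by per-key construction: the word set,
-- then each word's adjacency list computed independently as a filter of the pair list.

-- ===== PORT A =====
-- one fused loop over the pairs, maintaining the set and the dict together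
def get_hyponyms (pairs : List (String × String)) : List String × (List (String × List String)) :=
  let st := pairs.foldl
    (fun (st : PySem.Dict String (List String) × PySem.Set String) (p : String × String) =>
      match p with
      | (A, B) =>
        let words := (st.2.add A).add B
        let edges := if st.1.contains A then st.1 else st.1.insert A []
        let edges := if edges.contains B then edges else edges.insert B []
        let edges := edges.modify B [] (· ++ [A])
        (edges, words))
    (PySem.Dict.empty, PySem.Set.empty)
  (st.2, st.1.items)

-- ===== PORT B =====
-- the word set, then a dict comprehension: each word's list is a filter of the pairs
def get_hyponyms_alt (pairs : List (String × String)) : List String × (List (String × List String)) :=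
  let words : PySem.Set String := pairs.foldl
    (fun ws p => match p with | (a, b) => (ws.add a).add b) PySem.Set.empty
  let edges : PySem.Dict String (List String) := words.foldl
    (fun d w => d.insert w ((pairs.filter (fun p => p.2 == w)).map Prod.fst))
    PySem.Dict.empty
  (words, edges.items)

-- ===== PRECONDITION & SPEC =====
def Spec_get_hyponyms (pairs : List (String × String)) (out : List String × (List (String × List String))) : Prop := out = get_hyponyms_alt pairs
instance (pairs : List (String × String)) (out : List String × (List (String × List String))) : Decidable (Spec_get_hyponyms pairs out) := by unfold Spec_get_hyponyms; infer_instance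

-- ===== CLAIM (what is proved, stated in full; the proofs are below) =====
def Claim_equal_get_hyponyms : Prop := ∀ (pairs : List (String × String)), Dom_get_hyponyms pairs → Spec_get_hyponyms pairs (get_hyponyms pairs)

-- ===== LEMMAS AND PROOFS =====

-- the elementary steps of A's fused loop, and B's per-key list
def pvInsIf (d : PySem.Dict String (List String)) (k : String) : PySem.Dict String (List String) :=
  if d.contains k then d else d.insert k []

def pvStepK (d : PySem.Dict String (List String)) (p : String × String) : PySem.Dict String (List String) :=
  pvInsIf (pvInsIf d p.1) p.2

def pvStepM (d : PySem.Dict String (List String)) (p : String × String) : PySem.Dict String (List String) :=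
  d.modify p.2 [] (· ++ [p.1])

def pvStepW (ws : PySem.Set String) (p : String × String) : PySem.Set String :=
  (ws.add p.1).add p.2

def pvMk (ws : List String) : PySem.Dict String (List String) :=
  ws.foldl (fun d w => d.insert w []) PySem.Dict.empty

def pvF (pairs : List (String × String)) (w : String) : List String :=
  (pairs.filter (fun p => p.2 == w)).map Prod.fst

lemma pvContains_insIf (d : PySem.Dict String (List String)) (k b : String)
    (h : d.contains b = true) : (pvInsIf d k).contains b = true := by
  unfold pvInsIf
  split_ifs with h1
  · exact h
  · rw [PySem.Dict.contains_insert]; simp [h]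

lemma pvContains_stepK (d : PySem.Dict String (List String)) (p : String × String) (b : String)
    (h : d.contains b = true) : (pvStepK d p).contains b = true :=
  pvContains_insIf _ _ _ (pvContains_insIf _ _ _ h)

lemma pvContains_insIf_self (d : PySem.Dict String (List String)) (k : String) :
    (pvInsIf d k).contains k = true := by
  unfold pvInsIf
  split_ifs with h1
  · exact h1
  · rw [PySem.Dict.contains_insert]; simp

lemma pvContains_stepK_snd (d : PySem.Dict String (List String)) (p : String × String) :
    (pvStepK d p).contains p.2 = true :=
  pvContains_insIf_self (pvInsIf d p.1) p.2

lemma pvInsIf_modify_comm (d : PySem.Dict String (List String)) (b k : String)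
    (f : List String → List String) (hb : d.contains b = true) :
    pvInsIf (d.modify b [] f) k = (pvInsIf d k).modify b [] f := by
  by_cases hk : d.contains k = true
  · have h1 : (d.modify b [] f).contains k = true := by
      rw [PySem.Dict.contains_modify]; simp [hk]
    simp [pvInsIf, h1, hk]
  · have hk' : d.contains k = false := by simpa using hk
    have hne : k ≠ b := by
      intro e; rw [e, hb] at hk'; exact absurd hk' (by simp)
    have h1 : (d.modify b [] f).contains k = false := by
      rw [PySem.Dict.contains_modify]; simp [hk', hne]
    simp only [pvInsIf, h1, hk']
    simp only [Bool.false_eq_true, if_false]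
    -- both sides are two inserts at the distinct keys b (present) and k (absent)
    simp only [PySem.Dict.modify]
    rw [PySem.Dict.getD_insert_of_ne _ _ _ (Ne.symm hne)]
    apply PySem.Dict.ext
    have h2 : (d.insert b (f (d.getD b []))).contains k = false := by
      rw [PySem.Dict.contains_insert]; simp [hk', hne]
    have h3 : (d.insert k []).contains b = true := by
      rw [PySem.Dict.contains_insert]; simp [hb]
    rw [PySem.Dict.items_insert_of_not_contains _ _ h2,
        PySem.Dict.items_insert_of_contains _ _ h3,
        PySem.Dict.items_insert_of_contains _ _ hb,
        PySem.Dict.items_insert_of_not_contains _ _ hk']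
    simp [List.map_append, hne]

lemma pvStepK_modify_comm (d : PySem.Dict String (List String)) (b : String)
    (f : List String → List String) (p : String × String) (hb : d.contains b = true) :
    pvStepK (d.modify b [] f) p = (pvStepK d p).modify b [] f := by
  unfold pvStepK
  rw [pvInsIf_modify_comm d b p.1 f hb,
      pvInsIf_modify_comm (pvInsIf d p.1) b p.2 f (pvContains_insIf _ _ _ hb)]

lemma pvFoldK_modify (ps : List (String × String)) :
    ∀ (d : PySem.Dict String (List String)) (b : String) (f : List String → List String),
      d.contains b = true →
      ps.foldl pvStepK (d.modify b [] f) = (ps.foldl pvStepK d).modify b [] f := by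
  induction ps with
  | nil => intro d b f _; rfl
  | cons p ps ih =>
    intro d b f hb
    rw [List.foldl_cons, List.foldl_cons, pvStepK_modify_comm d b f p hb]
    exact ih _ _ _ (pvContains_stepK d p b hb)

-- A's fused loop is the key pass followed by the append pass, alongside the word pass
lemma pvMain (ps : List (String × String)) :
    ∀ (d : PySem.Dict String (List String)) (ws : PySem.Set String),
      ps.foldl
        (fun (st : PySem.Dict String (List String) × PySem.Set String) (p : String × String) =>
          match p with
          | (A, B) =>
            let words := (st.2.add A).add B
            let edges := if st.1.contains A then st.1 else st.1.insert A []
            let edges := if edges.contains B then edges else edges.insert B []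
            let edges := edges.modify B [] (· ++ [A])
            (edges, words)) (d, ws)
      = (ps.foldl pvStepM (ps.foldl pvStepK d), ps.foldl pvStepW ws) := by
  induction ps with
  | nil => intro d ws; rfl
  | cons p ps ih =>
    obtain ⟨a, b⟩ := p
    intro d ws
    rw [List.foldl_cons]
    show ps.foldl _ (pvStepM (pvStepK d (a, b)) (a, b), pvStepW ws (a, b)) = _
    rw [ih]
    have hb : (pvStepK d (a, b)).contains b = true := pvContains_stepK_snd d (a, b)
    have hrw : ps.foldl pvStepK (pvStepM (pvStepK d (a, b)) (a, b))
        = pvStepM (ps.foldl pvStepK (pvStepK d (a, b))) (a, b) := by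
      simp only [pvStepM]
      exact pvFoldK_modify ps _ b _ hb
    rw [hrw]
    conv_rhs => rw [List.foldl_cons, List.foldl_cons, List.foldl_cons]

lemma pvMk_keys : ∀ (ws : List String), ws.Nodup → (pvMk ws).keys = ws := by
  intro ws
  induction ws using List.reverseRecOn with
  | nil => intro _; rfl
  | append_singleton xs a ih =>
    intro h
    have hx : xs.Nodup := (List.nodup_append.mp h).1
    have ha : a ∉ xs := by
      intro hm
      exact (List.nodup_append.mp h).2.2 a hm a (List.mem_singleton_self a) rfl
    have hc : (pvMk xs).contains a = false := by
      rw [PySem.Dict.contains_eq_decide_mem_keys, ih hx]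
      simp [ha]
    unfold pvMk
    rw [List.foldl_append, List.foldl_cons, List.foldl_nil]
    show ((pvMk xs).insert a []).keys = xs ++ [a]
    rw [PySem.Dict.keys_insert_of_not_contains _ _ hc, ih hx]

lemma pvMk_insIf (ws : PySem.Set String) (h : ws.Nodup) (a : String) :
    pvInsIf (pvMk ws) a = pvMk (ws.add a) ∧ (ws.add a).Nodup := by
  have hc : (pvMk ws).contains a = decide (a ∈ ws) := by
    rw [PySem.Dict.contains_eq_decide_mem_keys, pvMk_keys ws h]
  by_cases hm : a ∈ ws
  · have hadd : ws.add a = ws := by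
      simp [PySem.Set.add, hm]
    rw [hadd]
    refine ⟨?_, h⟩
    simp [pvInsIf, hc, hm]
  · have hadd : ws.add a = ws ++ [a] := by
      simp [PySem.Set.add, hm]
    rw [hadd]
    constructor
    · unfold pvInsIf
      rw [hc]
      simp only [hm, decide_false, Bool.false_eq_true, if_false]
      unfold pvMk
      rw [List.foldl_append]
      rfl
    · simp [List.nodup_append, h]
      intro x hx e
      exact hm (e ▸ hx)

lemma pvFoldK_mk (ps : List (String × String)) :
    ∀ (ws : PySem.Set String), ws.Nodup →
      ps.foldl pvStepK (pvMk ws) = pvMk (ps.foldl pvStepW ws) ∧ (ps.foldl pvStepW ws).Nodup := by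
  induction ps with
  | nil => intro ws h; exact ⟨rfl, h⟩
  | cons p ps ih =>
    intro ws h
    obtain ⟨e1, h1⟩ := pvMk_insIf ws h p.1
    obtain ⟨e2, h2⟩ := pvMk_insIf (ws.add p.1) h1 p.2
    have hstep : pvStepK (pvMk ws) p = pvMk (pvStepW ws p) := by
      unfold pvStepK pvStepW
      rw [e1, e2]
    rw [List.foldl_cons, List.foldl_cons, hstep]
    exact ih (pvStepW ws p) h2

lemma pvB_w : (fun (ws : PySem.Set String) (p : String × String) =>
    match p with | (a, b) => (ws.add a).add b) = pvStepW := by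
  funext ws p; cases p; rfl

-- every value of pvMk is []
lemma pvMk_getD (k : String) : ∀ (ws : List String) (d : PySem.Dict String (List String)),
    d.getD k [] = [] → (ws.foldl (fun d w => d.insert w []) d).getD k [] = [] := by
  intro ws
  induction ws with
  | nil => intro d h; exact h
  | cons w ws ih =>
    intro d h
    rw [List.foldl_cons]
    apply ih
    rw [PySem.Dict.getD_insert]
    split_ifs <;> simp [h]

-- membership in the word pass
lemma pvMem_foldW (ps : List (String × String)) :
    ∀ (s : PySem.Set String) (x : String), x ∈ s → x ∈ ps.foldl pvStepW s := by
  induction ps with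
  | nil => intro s x h; exact h
  | cons p ps ih =>
    intro s x h
    rw [List.foldl_cons]
    exact ih _ _ (by rw [pvStepW, PySem.Set.mem_add, PySem.Set.mem_add]; exact Or.inl (Or.inl h))

lemma pvSnd_mem_foldW (ps : List (String × String)) :
    ∀ (s : PySem.Set String) (p : String × String), p ∈ ps → p.2 ∈ ps.foldl pvStepW s := by
  induction ps with
  | nil => intro s p h; cases h
  | cons q ps ih =>
    intro s p h
    rw [List.foldl_cons]
    rcases List.mem_cons.mp h with h | h
    · subst h
      exact pvMem_foldW ps _ _ (by rw [pvStepW, PySem.Set.mem_add]; exact Or.inr rfl)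
    · exact ih _ _ h

-- the append pass characterised by getD
lemma pvFoldM_getD (ps : List (String × String)) (d : PySem.Dict String (List String)) (w : String) :
    (ps.foldl pvStepM d).getD w [] = d.getD w [] ++ pvF ps w := by
  have h1 : ps.foldl pvStepM d
      = (ps.map Prod.swap).foldl (fun d p => d.modify p.1 [] (· ++ [p.2])) d := by
    rw [List.foldl_map]; rfl
  rw [h1, PySem.Dict.getD_foldl_modify_append]
  congr 1
  unfold pvF
  rw [List.filter_map, List.map_map]
  rfl

-- the append pass leaves the keys of pvMk ws unchanged when every target is in ws
lemma pvFoldM_keys (ps : List (String × String)) (ws : List String) (hnd : ws.Nodup)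
    (hmem : ∀ p ∈ ps, p.2 ∈ ws) :
    (ps.foldl pvStepM (pvMk ws)).keys = ws := by
  have h1 : ps.foldl pvStepM (pvMk ws)
      = ps.foldl (fun d p => d.modify p.2 [] (fun v => v ++ [p.1])) (pvMk ws) := rfl
  rw [h1, PySem.Dict.keys_foldl_modify_key]
  rw [PySem.Set.update_eq_append_filter]
  have h2 : (PySem.Set.ofList (ps.map Prod.snd)).filter
      (fun y => !(PySem.Set.contains (pvMk ws).keys y)) = [] := by
    rw [List.filter_eq_nil_iff]
    intro y hy
    have hym : y ∈ ps.map Prod.snd := (PySem.Set.mem_ofList _ y).mp hy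
    obtain ⟨p, hp, he⟩ := List.mem_map.mp hym
    have hk : y ∈ (pvMk ws).keys := by
      rw [pvMk_keys ws hnd]
      exact he ▸ hmem p hp
    simp
    exact hk
  rw [h2, List.append_nil, pvMk_keys ws hnd]

-- the two edge dicts are equal: same keys, same values
lemma pvEdges_eq (ps : List (String × String)) (ws : List String) (hnd : ws.Nodup)
    (hmem : ∀ p ∈ ps, p.2 ∈ ws) :
    ps.foldl pvStepM (pvMk ws)
      = ws.foldl (fun d w => d.insert w (pvF ps w)) PySem.Dict.empty := by
  apply PySem.Dict.ext
  have hkeys : (ps.foldl pvStepM (pvMk ws)).keys = ws := pvFoldM_keys ps ws hnd hmem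
  have hL : (ps.foldl pvStepM (pvMk ws)).items
      = ws.map (fun k => (k, pvF ps k)) := by
    rw [PySem.Dict.items_eq_map_keys _ (by rw [hkeys]; exact hnd) ([] : List String), hkeys]
    apply List.map_congr_left
    intro k _
    rw [pvFoldM_getD]
    have hmk : (pvMk ws).getD k [] = [] :=
      pvMk_getD k ws PySem.Dict.empty (PySem.Dict.getD_empty k [])
    rw [hmk]
    rfl
  have hR : (ws.foldl (fun d w => d.insert w (pvF ps w)) PySem.Dict.empty).items
      = ws.map (fun k => (k, pvF ps k)) := by
    have h := PySem.Dict.items_foldl_insert_fresh ws (fun a => a) (fun a => pvF ps a)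
      PySem.Dict.empty (by intro a _; exact PySem.Dict.contains_empty a)
      (by simpa using hnd)
    rw [h]
    rfl
  rw [hL, hR]

-- ===== VERDICT (by name: the statement is the Claim_ definition above) =====
theorem get_hyponyms_spec : Claim_equal_get_hyponyms := by
  intro pairs _
  show get_hyponyms pairs = get_hyponyms_alt pairs
  simp only [get_hyponyms, get_hyponyms_alt, pvB_w]
  rw [pvMain pairs PySem.Dict.empty PySem.Set.empty]
  obtain ⟨hK, hnd⟩ := pvFoldK_mk pairs [] List.nodup_nil
  have hK' : pairs.foldl pvStepK PySem.Dict.empty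
      = pvMk (pairs.foldl pvStepW PySem.Set.empty) := hK
  have hmem : ∀ p ∈ pairs, p.2 ∈ pairs.foldl pvStepW PySem.Set.empty :=
    fun p hp => pvSnd_mem_foldW pairs PySem.Set.empty p hp
  have hnd' : (pairs.foldl pvStepW PySem.Set.empty).Nodup := hnd
  rw [hK', pvEdges_eq pairs (pairs.foldl pvStepW PySem.Set.empty) hnd' hmem]
  rfl
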